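-- pv_equiv track=rewrite | github.com/jduranson27/Hack-Python-2 | hack_6.py | fn_hack_6
-- ===== SOURCE A (Python) =====
-- def fn_hack_6(s):
--     result = s
--     list = []
--
--     if not result:
--         return ['0']
--
--     for i in range(len(result)):
--         if (i+1) % 2 !=0:
--             list.append(str(i+1))
--         elif (i+1) % 2 == 0:
--             list.append('-')
--
--     result = list
--     return result
-- ===== SOURCE B (Python) =====
-- def fn_hack_6(s):
--     if not s:
--         return ['0']
--     result = ['-'] * len(s)
--     for i in range(0, len(s), 2):
--         result[i] = str(i + 1)
--     return result
-- ===== Notes on version B (the rewrite author's own statement) =====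
-- stated objective: alternative
-- what changed: Replaces the per-index parity branch (append the 1-based index or a dash depending on parity) by prefilling a dash-filled list of the right length and scattering the index strings only over the even positions with a stride-2 loop.
import Mathlib
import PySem

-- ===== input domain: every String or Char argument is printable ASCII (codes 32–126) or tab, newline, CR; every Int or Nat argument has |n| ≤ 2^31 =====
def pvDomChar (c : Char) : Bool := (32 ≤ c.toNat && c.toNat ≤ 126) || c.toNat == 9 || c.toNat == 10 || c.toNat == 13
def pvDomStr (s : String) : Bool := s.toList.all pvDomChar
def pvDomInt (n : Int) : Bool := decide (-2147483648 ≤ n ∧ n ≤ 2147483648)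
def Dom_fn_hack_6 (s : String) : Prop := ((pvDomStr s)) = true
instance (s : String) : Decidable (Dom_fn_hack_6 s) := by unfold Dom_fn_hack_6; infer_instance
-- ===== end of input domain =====

-- B replaces A's per-index parity branch by prefilling a dash-filled list and scattering
-- str(i+1) over the even indices with a stride-2 loop (alternative decomposition, same cost).

-- ===== PORT A =====
def fn_hack_6 (s : String) : List String :=
  if s.toList.length = 0 then ["0"]
  else
    (PySem.List.pyRange 0 (s.toList.length : Int) 1).foldl
      (fun l i =>
        if PySem.Int.mod (i + 1) 2 ≠ 0 then l ++ [PySem.Int.toStr (i + 1)]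
        else if PySem.Int.mod (i + 1) 2 = 0 then l ++ ["-"]
        else l) []

-- ===== PORT B =====
-- result[i] = str(i+1): every index produced by range(0, len(s), 2) is a valid
-- nonnegative index, so List.set is exact here.
def fn_hack_6_alt (s : String) : List String :=
  if s.toList.length = 0 then ["0"]
  else
    (PySem.List.pyRange 0 (s.toList.length : Int) 2).foldl
      (fun r i => r.set i.toNat (PySem.Int.toStr (i + 1)))
      (List.replicate s.toList.length "-")

-- ===== PRECONDITION & SPEC =====
def Spec_fn_hack_6 (s : String) (out : List String) : Prop := out = fn_hack_6_alt s
instance (s : String) (out : List String) : Decidable (Spec_fn_hack_6 s out) := by unfold Spec_fn_hack_6; infer_instance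

-- ===== CLAIM (what is proved, stated in full; the proofs are below) =====
def Claim_equal_fn_hack_6 : Prop := ∀ (s : String), Dom_fn_hack_6 s → Spec_fn_hack_6 s (fn_hack_6 s)

-- ===== LEMMAS AND PROOFS =====

-- the common value: position j (0-based) carries str(j+1) when j is even, '-' when odd
def pvF (n : Nat) : List String :=
  (List.range n).map (fun j => if j % 2 = 0 then PySem.Int.toStr ((j : Int) + 1) else "-")

lemma pvF_succ (n : Nat) :
    pvF (n + 1) = pvF n ++ [if n % 2 = 0 then PySem.Int.toStr ((n : Int) + 1) else "-"] := by
  simp [pvF, List.range_succ]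
  by_cases h : n % 2 = 0
  · rw [if_pos h, if_pos (by omega : (2:Int) ∣ (n:Int))]
  · rw [if_neg h, if_neg (by omega : ¬ (2:Int) ∣ (n:Int))]

lemma pvMod_eq (n : Int) : PySem.Int.mod (n + 1) 2 = (n + 1) % 2 := by
  simp [PySem.Int.mod, Int.fmod_eq_emod]

lemma pvA_fold (n : Nat) (acc : List String) :
    (PySem.List.pyRange 0 (n : Int) 1).foldl
      (fun l i =>
        if PySem.Int.mod (i + 1) 2 ≠ 0 then l ++ [PySem.Int.toStr (i + 1)]
        else if PySem.Int.mod (i + 1) 2 = 0 then l ++ ["-"]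
        else l) acc = acc ++ pvF n := by
  induction n generalizing acc with
  | zero => simp [pvF, PySem.List.pyRange_one_eq_nil]
  | succ n ih =>
    rw [show ((n + 1 : Nat) : Int) = (n : Int) + 1 by push_cast; ring,
      PySem.List.pyRange_one_succ_right (by positivity), List.foldl_append, ih, pvF_succ]
    simp only [List.foldl_cons, List.foldl_nil]
    by_cases h : n % 2 = 0
    · have hm : PySem.Int.mod ((n : Int) + 1) 2 ≠ 0 := by rw [pvMod_eq]; omega
      rw [if_pos hm, if_pos h, List.append_assoc]
    · have hm : PySem.Int.mod ((n : Int) + 1) 2 = 0 := by rw [pvMod_eq]; omega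
      rw [if_neg (not_not_intro hm), if_pos hm, if_neg h, List.append_assoc]

lemma pvB_scatter (n m : Nat) (h : 2 * m ≤ n + 1) :
    (List.range m).foldl
      (fun r k => r.set (2 * k) (PySem.Int.toStr (2 * (k : Int) + 1)))
      (List.replicate n "-")
      = pvF (min (2 * m) n) ++ List.replicate (n - 2 * m) "-" := by
  induction m with
  | zero => simp [pvF]
  | succ m ih =>
    have hlt : 2 * m < n := by omega
    rw [List.range_succ, List.foldl_append, ih (by omega)]
    simp only [List.foldl_cons, List.foldl_nil]
    have hmin : min (2 * m) n = 2 * m := by omega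
    have hlen : (pvF (2 * m)).length = 2 * m := by simp [pvF]
    rw [hmin, List.set_append, hlen]
    simp only [lt_irrefl, Nat.sub_self]
    have hrep : List.replicate (n - 2 * m) "-" = "-" :: List.replicate (n - 2 * m - 1) "-" := by
      rw [show n - 2 * m = (n - 2 * m - 1) + 1 by omega]; rfl
    rw [hrep]
    by_cases hn : n = 2 * m + 1
    · subst hn
      have : min (2 * (m + 1)) (2 * m + 1) = 2 * m + 1 := by omega
      rw [this, show 2 * m + 1 - 2 * (m + 1) = 0 from by omega, pvF_succ]
      simp [Nat.mul_mod_right]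
    · have hge : 2 * m + 2 ≤ n := by omega
      have : min (2 * (m + 1)) n = 2 * m + 2 := by omega
      rw [this, show 2 * m + 2 = (2 * m + 1) + 1 from rfl, pvF_succ, pvF_succ]
      have h1 : (2 * m) % 2 = 0 := Nat.mul_mod_right 2 m
      have h2 : (2 * m + 1) % 2 ≠ 0 := by omega
      simp only [h1, List.append_assoc, List.cons_append, List.nil_append]
      rw [if_neg h2, show n - 2 * (m + 1) = n - 2 * m - 2 from by omega,
        show n - 2 * m - 1 = (n - 2 * m - 2) + 1 from by omega, List.replicate_succ]
      simp

lemma pvB_eq (n : Nat) (hn : 0 < n) :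
    (PySem.List.pyRange 0 (n : Int) 2).foldl
      (fun r i => r.set i.toNat (PySem.Int.toStr (i + 1)))
      (List.replicate n "-") = pvF n := by
  rw [PySem.List.pyRange_of_pos 0 (n : Int) (by norm_num)]
  have hc : (if (0 : Int) < (n : Int) then (((n : Int) - 0 + 2 - 1) / 2).toNat else 0)
      = (n + 1) / 2 := by
    rw [if_pos (by exact_mod_cast hn)]; omega
  rw [hc, List.foldl_map]
  have hfun : (fun (r : List String) (k : Nat) =>
      r.set ((0 : Int) + 2 * (k : Int)).toNat (PySem.Int.toStr ((0 : Int) + 2 * (k : Int) + 1)))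
      = fun r k => r.set (2 * k) (PySem.Int.toStr (2 * (k : Int) + 1)) := by
    funext r k
    congr 1 <;> [skip; ring_nf]
    omega
  rw [hfun, pvB_scatter n ((n + 1) / 2) (by omega)]
  have : min (2 * ((n + 1) / 2)) n = n := by omega
  rw [this, show n - 2 * ((n + 1) / 2) = 0 from by omega]
  simp

-- ===== VERDICT (by name: the statement is the Claim_ definition above) =====
theorem fn_hack_6_spec : Claim_equal_fn_hack_6 := by
  intro s _
  unfold Spec_fn_hack_6 fn_hack_6 fn_hack_6_alt
  by_cases h : s.toList.length = 0
  · simp [h]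
  · rw [if_neg h, if_neg h, pvA_fold, pvB_eq _ (Nat.pos_of_ne_zero h)]
    simp
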